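-- pv_equiv track=rewrite | github.com/thesparkvision/AdventOfCode | 2023/day3/part1/main.py | find_complete_part_number
-- ===== SOURCE A (Python) =====
-- def is_cell_number(i, j, engine_schematic):
--     return ord('0') <= ord(engine_schematic[i][j]) <= ord('9')
--
-- def find_complete_part_number(ni, nj, engine_schematic):
--     complete_part_number = ""
--     complete_part_number += engine_schematic[ni][nj]
--     rel_left = nj - 1
--     rel_right = nj + 1
--     length = len(engine_schematic[ni])
--
--     while rel_left >= 0:
--         if is_cell_number(ni, rel_left, engine_schematic):
--             complete_part_number = engine_schematic[ni][rel_left] + complete_part_number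
--         else:
--             break
--         rel_left -= 1
--
--     while rel_right < length:
--         if is_cell_number(ni, rel_right, engine_schematic):
--             complete_part_number += engine_schematic[ni][rel_right]
--         else:
--             break
--         rel_right += 1
--
--     complete_part_number = int(complete_part_number)
--     return complete_part_number
-- ===== SOURCE B (Python) =====
-- def _digits_prefix(s):
--     out = ""
--     for ch in s:
--         if '0' <= ch <= '9':
--             out += ch
--         else:
--             break
--     return out
--
-- def find_complete_part_number(ni, nj, engine_schematic):
--     row = engine_schematic[ni]
--     left = _digits_prefix(row[:nj][::-1])[::-1]
--     right = _digits_prefix(row[nj + 1:])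
--     return int(left + row[nj] + right)
-- ===== Notes on version B (the rewrite author's own statement) =====
-- stated objective: simpler
-- what changed: B replaces A's two index-walking accumulation loops around nj with slice-based decomposition: digit-prefix of the reversed left slice and of the right slice, concatenated once and converted with int().
-- outside the precondition, e.g. on find_complete_part_number(0, -1, ['123']): A returns 3123, B returns 123123
import Mathlib
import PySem

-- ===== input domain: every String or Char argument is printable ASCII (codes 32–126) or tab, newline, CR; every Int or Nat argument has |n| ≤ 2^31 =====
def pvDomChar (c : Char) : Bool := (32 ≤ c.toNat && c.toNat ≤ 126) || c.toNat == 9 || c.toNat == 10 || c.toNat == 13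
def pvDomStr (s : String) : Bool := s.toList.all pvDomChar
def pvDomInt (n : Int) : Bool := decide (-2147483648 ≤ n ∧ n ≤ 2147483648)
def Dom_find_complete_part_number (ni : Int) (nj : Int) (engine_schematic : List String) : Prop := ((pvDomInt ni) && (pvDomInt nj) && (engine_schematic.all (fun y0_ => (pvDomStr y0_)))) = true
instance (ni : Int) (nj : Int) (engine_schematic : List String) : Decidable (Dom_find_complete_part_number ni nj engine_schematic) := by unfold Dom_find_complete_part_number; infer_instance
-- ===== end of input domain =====

-- B rebuilds the number by slicing the row and taking digit prefixes instead of A's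
-- index-walking accumulation loops (objective: simpler). Equality of the RETURN value only.

-- ===== PORT A =====
-- is_cell_number: ord('0') <= ord(c) <= ord('9')  (Char ≤ is code-point order, exact on ASCII)
def pvIsDig (c : Char) : Bool := decide ('0' ≤ c) && decide (c ≤ '9')

-- while rel_left >= 0: prepend the digit char or break (a `none` lookup is where Python's
-- is_cell_number raises IndexError — outside Pre_)
def pvGoLeft (row : List Char) (i : Int) (acc : List Char) : List Char :=
  if _h : 0 ≤ i then
    match PySem.List.pyGet? row i with
    | some c => if pvIsDig c then pvGoLeft row (i - 1) (c :: acc) else acc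
    | none => acc
  else acc
termination_by (i + 1).toNat
decreasing_by omega

-- while rel_right < length: append the digit char or break (none lookup likewise outside Pre_)
def pvGoRight (row : List Char) (length : Int) (i : Int) (acc : List Char) : List Char :=
  if _h : i < length then
    match PySem.List.pyGet? row i with
    | some c => if pvIsDig c then pvGoRight row length (i + 1) (acc ++ [c]) else acc
    | none => acc
  else acc
termination_by (length - i).toNat
decreasing_by omega

def find_complete_part_number (ni : Int) (nj : Int) (engine_schematic : List String) : Int :=
  let row := ((PySem.List.pyGet? engine_schematic ni).getD "").toList  -- engine_schematic[ni]; none = IndexError, outside Pre_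
  let c0 := (PySem.List.pyGet? row nj).getD ' '                        -- engine_schematic[ni][nj]; none = IndexError, outside Pre_
  let acc1 := pvGoLeft row (nj - 1) [c0]
  let acc2 := pvGoRight row (row.length : Int) (nj + 1) acc1
  (PySem.Int.ofChars? acc2).getD 0                                     -- int(...); none = ValueError, outside Pre_

-- ===== PORT B =====
-- _digits_prefix: for ch in s: keep while digit, else break
def pvDigitsPrefix : List Char → List Char
  | [] => []
  | c :: t => if pvIsDig c then c :: pvDigitsPrefix t else []

def find_complete_part_number_alt (ni : Int) (nj : Int) (engine_schematic : List String) : Int :=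
  let row := ((PySem.List.pyGet? engine_schematic ni).getD "").toList  -- engine_schematic[ni]; none = IndexError, outside Pre_
  let left := (pvDigitsPrefix (PySem.List.slice row none (some nj)).reverse).reverse  -- _digits_prefix(row[:nj][::-1])[::-1]
  let right := pvDigitsPrefix (PySem.List.slice row (some (nj + 1)) none)             -- _digits_prefix(row[nj+1:])
  let c0 := (PySem.List.pyGet? row nj).getD ' '                        -- row[nj]; none = IndexError, outside Pre_
  (PySem.Int.ofChars? (left ++ [c0] ++ right)).getD 0                  -- int(...); none = ValueError, outside Pre_

-- ===== PRECONDITION & SPEC =====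
-- Closed-form test that int() accepts the assembled text: a digit centre always works; a sign,
-- underscore or whitespace centre works exactly in the digit context int's grammar allows.
def pvParseOK (row : List Char) (j : Int) : Bool :=
  let c := (PySem.List.pyGet? row j).getD ' '
  let L := decide (1 ≤ j) && pvIsDig ((PySem.List.pyGet? row (j - 1)).getD ' ')
  let R := pvIsDig ((PySem.List.pyGet? row (j + 1)).getD ' ')
  if pvIsDig c then true
  else if c = '+' || c = '-' then !L && R
  else if c = '_' then L && R
  else if c = ' ' || c = '\t' || c = '\n' || c = '\r' then L != R
  else false

-- Pre_ excludes inputs where A raises (row or column index out of range; int() ValueError when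
-- the assembled text is not an int literal) and negative nj, where A's negative-index wraparound
-- read followed by a rightward scan from column 0 gives an accidental value.
def Pre_find_complete_part_number (ni : Int) (nj : Int) (engine_schematic : List String) : Prop :=
  PySem.Raise.InRange engine_schematic.length ni ∧
  0 ≤ nj ∧
  nj < (((PySem.List.pyGet? engine_schematic ni).getD "").toList.length : Int) ∧
  pvParseOK ((PySem.List.pyGet? engine_schematic ni).getD "").toList nj = true
instance (ni : Int) (nj : Int) (engine_schematic : List String) : Decidable (Pre_find_complete_part_number ni nj engine_schematic) := by unfold Pre_find_complete_part_number; infer_instance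

def pvWitness_find_complete_part_number : Int × Int × List String := (0, 1, ["*42."])

def Spec_find_complete_part_number (ni : Int) (nj : Int) (engine_schematic : List String) (out : Int) : Prop := out = find_complete_part_number_alt ni nj engine_schematic
instance (ni : Int) (nj : Int) (engine_schematic : List String) (out : Int) : Decidable (Spec_find_complete_part_number ni nj engine_schematic out) := by unfold Spec_find_complete_part_number; infer_instance

-- ===== CLAIM (what is proved, stated in full; the proofs are below) =====
def Claim_equal_find_complete_part_number : Prop := ∀ (ni : Int) (nj : Int) (engine_schematic : List String), Dom_find_complete_part_number ni nj engine_schematic → Pre_find_complete_part_number ni nj engine_schematic → Spec_find_complete_part_number ni nj engine_schematic (find_complete_part_number ni nj engine_schematic)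

-- ===== LEMMAS AND PROOFS =====

-- A's left loop started at index n-1 collects exactly the digit prefix of the reversed take-n, re-reversed.
theorem pvGoLeft_eq (row : List Char) : ∀ (n : Nat) (acc : List Char), n ≤ row.length →
    pvGoLeft row ((n : Int) - 1) acc = (pvDigitsPrefix (row.take n).reverse).reverse ++ acc := by
  intro n
  induction n with
  | zero =>
    intro acc _
    rw [pvGoLeft]
    simp [pvDigitsPrefix]
  | succ m ih =>
    intro acc hm
    have hmlt : m < row.length := by omega
    have hidx : PySem.List.pyGet? row ((m : Int)) = some row[m] := by
      simp [hmlt]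
    rw [show ((m + 1 : Nat) : Int) - 1 = (m : Int) from by push_cast; ring]
    rw [pvGoLeft, dif_pos (by omega : (0:Int) ≤ (m : Int)), hidx]
    dsimp only
    have htake : row.take (m + 1) = row.take m ++ [row[m]] := by
      rw [List.take_add_one]
      simp [hmlt]
    by_cases hd : pvIsDig row[m]
    · rw [if_pos hd, show ((m : Int)) - 1 = ((m : Nat) : Int) - 1 from by norm_num,
        ih (row[m] :: acc) (by omega), htake]
      simp only [List.reverse_append, List.reverse_cons, List.reverse_nil, List.nil_append,
        pvDigitsPrefix, hd, if_true, List.append_assoc, List.cons_append]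
    · rw [if_neg hd, htake]
      simp only [List.reverse_append, List.reverse_cons, List.reverse_nil, List.nil_append,
        List.singleton_append, pvDigitsPrefix, hd, if_false, List.reverse_nil, Bool.false_eq_true]

-- A's right loop started at index n collects exactly the digit prefix of drop n, appended to acc.
theorem pvGoRight_eq (row : List Char) : ∀ (k : Nat) (n : Nat) (acc : List Char), row.length ≤ n + k →
    pvGoRight row (row.length : Int) (n : Int) acc = acc ++ pvDigitsPrefix (row.drop n) := by
  intro k
  induction k with
  | zero =>
    intro n acc h
    rw [pvGoRight, dif_neg (by omega : ¬ ((n : Int) < (row.length : Int))),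
      List.drop_eq_nil_of_le (by omega : row.length ≤ n)]
    simp [pvDigitsPrefix]
  | succ m ih =>
    intro n acc h
    by_cases hn : n < row.length
    · have hidx : PySem.List.pyGet? row ((n : Int)) = some row[n] := by
        simp [hn]
      have hdrop : row.drop n = row[n] :: row.drop (n + 1) := List.drop_eq_getElem_cons hn
      rw [pvGoRight, dif_pos (by omega : ((n : Int) < (row.length : Int))), hidx]
      dsimp only
      by_cases hd : pvIsDig row[n]
      · rw [if_pos hd, show ((n : Int)) + 1 = ((n + 1 : Nat) : Int) from by push_cast; ring,
          ih (n + 1) (acc ++ [row[n]]) (by omega), hdrop]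
        simp [pvDigitsPrefix, hd]
      · rw [if_neg hd, hdrop]
        simp [pvDigitsPrefix, hd]
    · rw [pvGoRight, dif_neg (by omega : ¬ ((n : Int) < (row.length : Int))),
        List.drop_eq_nil_of_le (by omega : row.length ≤ n)]
      simp [pvDigitsPrefix]

-- ===== VERDICT (by name: the statement is the Claim_ definition above) =====
theorem find_complete_part_number_spec : Claim_equal_find_complete_part_number := by
  intro ni nj es _ hpre
  obtain ⟨_, hnj0, hnjlt, _⟩ := hpre
  unfold Spec_find_complete_part_number find_complete_part_number find_complete_part_number_alt
  obtain ⟨j, rfl⟩ : ∃ j : Nat, nj = (j : Int) := ⟨nj.toNat, (Int.toNat_of_nonneg hnj0).symm⟩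
  set row := ((PySem.List.pyGet? es ni).getD "").toList with hrow
  have hj : j < row.length := by exact_mod_cast hnjlt
  have hL := pvGoLeft_eq row j [(PySem.List.pyGet? row (j : Int)).getD ' '] (by omega)
  have hcast : ((j : Int)) + 1 = ((j + 1 : Nat) : Int) := by push_cast; ring
  have hR := pvGoRight_eq row row.length (j + 1)
      (pvGoLeft row ((j : Int) - 1) [(PySem.List.pyGet? row (j : Int)).getD ' ']) (by omega)
  simp only [hcast, hL] at hR ⊢
  rw [hR]
  rw [PySem.List.slice_to_natCast, PySem.List.slice_from_natCast, List.append_assoc]
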